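-- pv_equiv track=rewrite | github.com/ElianFelix/RSA-encryption | RSA_crypto.py | ur_decompose
-- ===== SOURCE A (Python) =====
-- def ur_decompose(p, bits):
--     """Helper function for primality test, helps decompose p-1 into 2 raised to an exponent u times some odd number.
--     takes integer prime candidate p and integer bits representing the bitsize of p
--     returns tuple consisting of exponent u and odd integer r
--     """
--
--     m = p - 1
--     ubits = range(1, bits // 2)
--     for u in ubits:
--         r, rem = divmod(m, 2 ** u)
--         if r % 2 == 1 and rem == 0:
--             return u, r
--     return 0, 0
-- ===== SOURCE B (Python) =====
-- def ur_decompose(p, bits):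
--     """Decompose p-1 as 2**u * r with r odd, via a direct trailing-zero count instead of a scan over candidate exponents."""
--     m = p - 1
--     if m == 0:
--         return 0, 0
--     t = (m & -m).bit_length() - 1
--     if 1 <= t < bits // 2:
--         return t, m >> t
--     return 0, 0
-- ===== Notes on version B (the rewrite author's own statement) =====
-- stated objective: alternative
-- what changed: Replaced A's linear scan over candidate exponents (each iteration recomputing 2**u and a full divmod) by a direct trailing-zero count via the (m & -m).bit_length()-1 bit trick, followed by a single range check and one shift.
import Mathlib
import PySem

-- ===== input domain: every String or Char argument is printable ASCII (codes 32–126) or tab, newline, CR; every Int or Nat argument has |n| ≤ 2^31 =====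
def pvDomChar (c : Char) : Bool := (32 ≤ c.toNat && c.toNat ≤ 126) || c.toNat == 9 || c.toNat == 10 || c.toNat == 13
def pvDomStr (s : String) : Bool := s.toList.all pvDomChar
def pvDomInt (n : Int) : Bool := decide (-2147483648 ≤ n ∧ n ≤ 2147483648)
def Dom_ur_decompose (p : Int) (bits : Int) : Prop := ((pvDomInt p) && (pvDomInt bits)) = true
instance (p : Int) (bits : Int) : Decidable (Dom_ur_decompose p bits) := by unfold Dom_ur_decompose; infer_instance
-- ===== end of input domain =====

-- B replaces A's scan over candidate exponents by a direct trailing-zero count ((m & -m).bit_length() - 1); objective: alternative algorithm.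

-- ===== PORT A =====
-- A's for-loop 'for u in range(1, bits//2)' with early return, ported as the counter recursion
-- that Python's lazy range performs: u runs from 1 while u < bits//2; the first u with
-- (r odd and rem == 0) wins.  Every visited u satisfies 1 ≤ u, so 2 ** u is exactly (2 : Int) ^ u.toNat.
def urLoopA (m : Int) (stop : Int) (u : Int) : List Int :=
  if h : u < stop then
    let r := PySem.Int.floordiv m (2 ^ u.toNat)
    let rem := PySem.Int.mod m (2 ^ u.toNat)
    if PySem.Int.mod r 2 = 1 ∧ rem = 0 then [u, r] else urLoopA m stop (u + 1)
  else [0, 0]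
termination_by (stop - u).toNat
decreasing_by omega

def ur_decompose (p : Int) (bits : Int) : List Int :=
  urLoopA (p - 1) (PySem.Int.floordiv bits 2) 1

-- ===== PORT B =====
-- Source B, step for step: Python's m >> t is Lean's m >>> t (arithmetic shift, exact), and
-- (m & -m).bit_length() - 1 is PySem.Int.bitLength (PySem.Int.band m (-m)) - 1.
def ur_decompose_alt (p : Int) (bits : Int) : List Int :=
  let m := p - 1
  if m = 0 then [0, 0]
  else
    let t : Nat := PySem.Int.bitLength (PySem.Int.band m (-m)) - 1
    if 1 ≤ t ∧ (t : Int) < PySem.Int.floordiv bits 2 then [(t : Int), m >>> t]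
    else [0, 0]

-- ===== PRECONDITION & SPEC =====
def Spec_ur_decompose (p : Int) (bits : Int) (out : List Int) : Prop := out = ur_decompose_alt p bits
instance (p : Int) (bits : Int) (out : List Int) : Decidable (Spec_ur_decompose p bits out) := by unfold Spec_ur_decompose; infer_instance

-- ===== CLAIM (what is proved, stated in full; the proofs are below) =====
def Claim_equal_ur_decompose : Prop := ∀ (p : Int) (bits : Int), Dom_ur_decompose p bits → Spec_ur_decompose p bits (ur_decompose p bits)

-- ===== LEMMAS AND PROOFS =====

-- proof-side helper: the same loop body over an explicit list of candidate exponents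
def urLoopAList (m : Int) : List Int → List Int
  | [] => [0, 0]
  | u :: rest =>
    let r := PySem.Int.floordiv m (2 ^ u.toNat)
    let rem := PySem.Int.mod m (2 ^ u.toNat)
    if PySem.Int.mod r 2 = 1 ∧ rem = 0 then [u, r] else urLoopAList m rest

-- the counter recursion scans exactly the list range(u, stop)
theorem urLoopA_eq_list (m : Int) (stop u : Int) :
    urLoopA m stop u = urLoopAList m (PySem.List.pyRange u stop 1) := by
  by_cases h : u < stop
  · rw [urLoopA, dif_pos h, PySem.List.pyRange_one_cons h]
    simp only [urLoopAList]
    by_cases hc : PySem.Int.mod (PySem.Int.floordiv m (2 ^ u.toNat)) 2 = 1 ∧ PySem.Int.mod m (2 ^ u.toNat) = 0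
    · rw [if_pos hc, if_pos hc]
    · rw [if_neg hc, if_neg hc, urLoopA_eq_list m stop (u + 1)]
  · rw [urLoopA, dif_neg h, PySem.List.pyRange_one_eq_nil (by omega)]
    rfl
termination_by (stop - u).toNat
decreasing_by omega

-- A's loop on m = 0 never fires (r = 0 is even), so it falls through to [0, 0].
theorem urLoopAList_zero (l : List Int) : urLoopAList 0 l = [0, 0] := by
  induction l with
  | nil => rfl
  | cons u rest ih =>
    simp [urLoopAList, PySem.Int.floordiv, PySem.Int.mod, ih]

-- n &&& (n - 1) clears the lowest set bit (Nat level), for n = 2^t * r with r odd.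
theorem nat_and_pred (t : Nat) (r : Nat) (hr : r % 2 = 1) :
    (2 ^ t * r) &&& (2 ^ t * r - 1) = 2 ^ t * (r - 1) := by
  have h2 : 0 < 2 ^ t := Nat.two_pow_pos t
  have hpred : 2 ^ t * r - 1 = 2 ^ t * (r - 1) + (2 ^ t - 1) := by
    have e : 2 ^ t * r = 2 ^ t * (r - 1) + 2 ^ t := by
      rw [← Nat.mul_succ]; congr 1; omega
    omega
  have hshift : (2 ^ t * r - 1) >>> t = r - 1 := by
    rw [Nat.shiftRight_eq_div_pow, hpred, Nat.mul_add_div h2, Nat.div_eq_of_lt (by omega), Nat.add_zero]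
  apply Nat.eq_of_testBit_eq
  intro i
  rw [Nat.testBit_land, Nat.testBit_two_pow_mul, Nat.testBit_two_pow_mul]
  by_cases hit : t ≤ i
  · have hb : (2 ^ t * r - 1).testBit i = (r - 1).testBit (i - t) := by
      calc (2 ^ t * r - 1).testBit i = (2 ^ t * r - 1).testBit (t + (i - t)) := by congr 1; omega
        _ = ((2 ^ t * r - 1) >>> t).testBit (i - t) := (Nat.testBit_shiftRight _).symm
        _ = (r - 1).testBit (i - t) := by rw [hshift]
    rw [hb]
    simp only [ge_iff_le, hit, decide_true, Bool.true_and]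
    cases hj : i - t with
    | zero => simp [Nat.testBit_zero]; omega
    | succ j =>
      have : r.testBit (j + 1) = (r - 1).testBit (j + 1) := by
        rw [Nat.testBit_succ, Nat.testBit_succ]; congr 1; omega
      rw [this, Bool.and_self]
  · simp [hit]

-- hence n - (n &&& (n - 1)) isolates the lowest set bit 2^t.
theorem nat_lowbit (t : Nat) (r : Nat) (hr : r % 2 = 1) :
    2 ^ t * r - ((2 ^ t * r) &&& (2 ^ t * r - 1)) = 2 ^ t := by
  rw [nat_and_pred t r hr]
  have e : 2 ^ t * r = 2 ^ t * (r - 1) + 2 ^ t := by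
    rw [← Nat.mul_succ]; congr 1; omega
  rw [e, Nat.add_sub_cancel_left]

-- Python's m & -m for m = 2^t * r (r odd, m ≠ 0) is the lowest set bit 2^t — for either sign of m.
theorem band_neg_self (m : Int) (t : Nat) (r : Int) (hr : Odd r) (hm : m = 2 ^ t * r) (h0 : m ≠ 0) :
    PySem.Int.band m (-m) = 2 ^ t := by
  have hrn : r.natAbs % 2 = 1 := Nat.odd_iff.mp (Int.natAbs_odd.mpr hr)
  have habs : m.natAbs = 2 ^ t * r.natAbs := by
    rw [hm, Int.natAbs_mul, Int.natAbs_pow]; rfl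
  rcases lt_or_gt_of_ne h0 with hneg | hpos
  · have h1 : ¬ (0 ≤ m) := by omega
    have h2 : 0 ≤ -m := by omega
    simp only [PySem.Int.band, h1, h2, if_true, if_false]
    have e1 : (-m).toNat = m.natAbs := by omega
    have e2 : (-m - 1).toNat = m.natAbs - 1 := by omega
    rw [e1, e2, habs, nat_lowbit t r.natAbs hrn]
    push_cast
    ring
  · have h1 : (0 : Int) ≤ m := by omega
    have h2 : ¬ ((0 : Int) ≤ -m) := by omega
    simp only [PySem.Int.band, h1, h2, if_true, if_false]
    have e1 : m.toNat = m.natAbs := by omega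
    have e2 : (-(-m) - 1).toNat = m.natAbs - 1 := by omega
    rw [e1, e2, habs, nat_lowbit t r.natAbs hrn]
    push_cast
    ring

theorem bitLength_two_pow (t : Nat) : PySem.Int.bitLength ((2 : Int) ^ t) = t + 1 := by
  induction t with
  | zero =>
    have : ((2 : Int) ^ 0) = ((1 : Nat) : Int) := by norm_num
    rw [this, PySem.Int.bitLength_natCast (by norm_num)]
    norm_num [PySem.Int.bitLength_zero]
  | succ t ih =>
    have h1 : ((2 : Int) ^ (t + 1)) = ((2 ^ (t + 1) : Nat) : Int) := by push_cast; ring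
    rw [h1, PySem.Int.bitLength_natCast (Nat.two_pow_pos (t + 1))]
    have e : 2 ^ (t + 1) / 2 = 2 ^ t := by
      rw [Nat.pow_succ, Nat.mul_div_cancel _ (by norm_num)]
    rw [e]
    have h2 : ((2 ^ t : Nat) : Int) = (2 : Int) ^ t := by push_cast; ring
    rw [h2, ih]

theorem floordiv_factor (t k : Nat) (r : Int) (hk : k ≤ t) :
    PySem.Int.floordiv (2 ^ t * r) (2 ^ k) = 2 ^ (t - k) * r := by
  rw [PySem.Int.floordiv_eq_ediv_of_pos (by positivity)]
  have e : (2 : Int) ^ t = 2 ^ k * 2 ^ (t - k) := by rw [← pow_add]; congr 1; omega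
  rw [e, mul_assoc, Int.mul_ediv_cancel_left _ (by positivity)]

theorem mod_two_one_iff (x : Int) : PySem.Int.mod x 2 = 1 ↔ Odd x := by
  rw [PySem.Int.mod_eq_emod_of_pos (by norm_num), Int.odd_iff]

-- A's loop test at exponent u ≥ 1 holds exactly at u = t, the 2-adic valuation of m = 2^t * r.
theorem cond_iff (m : Int) (t : Nat) (r : Int) (hr : Odd r) (hm : m = 2 ^ t * r) (u : Int) (hu : 1 ≤ u) :
    (PySem.Int.mod (PySem.Int.floordiv m (2 ^ u.toNat)) 2 = 1 ∧ PySem.Int.mod m (2 ^ u.toNat) = 0)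
      ↔ u = (t : Int) := by
  have hut : u = (u.toNat : Int) := by omega
  constructor
  · rintro ⟨hodd, hrem⟩
    rw [PySem.Int.mod_eq_zero_iff_dvd] at hrem
    have hk : u.toNat ≤ t := by
      by_contra hgt
      have hd : (2 : Int) ^ (t + 1) ∣ m := dvd_trans (pow_dvd_pow 2 (by omega)) hrem
      rw [hm, pow_succ] at hd
      have h2r : (2 : Int) ∣ r := (mul_dvd_mul_iff_left (a := (2 : Int) ^ t) (by positivity)).mp hd
      rw [Int.odd_iff] at hr
      omega
    rw [hm, floordiv_factor t u.toNat r hk, mod_two_one_iff] at hodd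
    have ht : t - u.toNat = 0 := by
      by_contra hne
      have : (2 : Int) ∣ 2 ^ (t - u.toNat) * r := Dvd.dvd.mul_right (dvd_pow_self 2 hne) r
      rw [Int.odd_iff] at hodd
      omega
    omega
  · rintro rfl
    have htn : (t : Int).toNat = t := by omega
    constructor
    · rw [hm, htn, floordiv_factor t t r (le_refl t), Nat.sub_self, pow_zero, one_mul, mod_two_one_iff]
      exact hr
    · rw [PySem.Int.mod_eq_zero_iff_dvd, hm, htn]
      exact Dvd.intro _ rfl

-- characterisation of A's whole loop: it returns [t, r] iff t occurs in the scanned range.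
theorem urLoopAList_eq (m : Int) (t : Nat) (r : Int) (hr : Odd r) (hm : m = 2 ^ t * r)
    (l : List Int) (hl : ∀ u ∈ l, 1 ≤ u) :
    urLoopAList m l = if (t : Int) ∈ l then [(t : Int), r] else [0, 0] := by
  induction l with
  | nil => simp [urLoopAList]
  | cons u rest ih =>
    have hu : 1 ≤ u := hl u (by simp)
    have hrest : ∀ v ∈ rest, 1 ≤ v := fun v hv => hl v (by simp [hv])
    by_cases heq : u = (t : Int)
    · subst heq
      simp only [urLoopAList]
      rw [if_pos ((cond_iff m t r hr hm ((t : Int)) hu).mpr rfl)]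
      rw [if_pos (List.mem_cons_self)]
      have htn : ((t : Int)).toNat = t := by omega
      have hq : PySem.Int.floordiv m (2 ^ ((t : Int)).toNat) = r := by
        rw [hm, htn, floordiv_factor t t r (le_refl t), Nat.sub_self, pow_zero, one_mul]
      rw [hq]
    · simp only [urLoopAList]
      rw [if_neg (fun hc => heq ((cond_iff m t r hr hm u hu).mp hc))]
      rw [ih hrest]
      have hmem : ((t : Int) ∈ u :: rest) ↔ ((t : Int) ∈ rest) := by
        constructor
        · intro h
          rcases List.mem_cons.mp h with h | h
          · exact absurd h.symm heq
          · exact h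
        · exact fun h => List.mem_cons_of_mem _ h
      by_cases h2 : (t : Int) ∈ rest
      · rw [if_pos h2, if_pos (hmem.mpr h2)]
      · rw [if_neg h2, if_neg (fun hc => h2 (hmem.mp hc))]

-- every m ≠ 0 is 2^t times an odd number.
theorem exists_two_pow_mul_odd (m : Int) (h0 : m ≠ 0) : ∃ (t : Nat) (r : Int), Odd r ∧ m = 2 ^ t * r := by
  obtain ⟨t, rn, hodd, habs⟩ := Nat.exists_eq_two_pow_mul_odd (n := m.natAbs) (by omega)
  by_cases hpos : 0 ≤ m
  · refine ⟨t, (rn : Int), Int.natAbs_odd.mp (by simpa using hodd), ?_⟩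
    have : m = (m.natAbs : Int) := by omega
    rw [this, habs]; push_cast; ring
  · refine ⟨t, -(rn : Int), (Int.natAbs_odd.mp (by simpa using hodd)).neg, ?_⟩
    have hneg : m < 0 := by omega
    have : m = -(m.natAbs : Int) := by omega
    rw [this, habs]; push_cast; ring

-- ===== VERDICT (by name: the statement is the Claim_ definition above) =====
theorem ur_decompose_spec : Claim_equal_ur_decompose := by
  intro p bits _
  unfold Spec_ur_decompose
  show ur_decompose p bits = ur_decompose_alt p bits
  by_cases h0 : p - 1 = 0
  · simp [ur_decompose, ur_decompose_alt, h0, urLoopA_eq_list, urLoopAList_zero]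
  · obtain ⟨t, r, hr, hm⟩ := exists_two_pow_mul_odd (p - 1) h0
    have hband : PySem.Int.band (p - 1) (-(p - 1)) = 2 ^ t := band_neg_self (p - 1) t r hr hm h0
    have hbl : PySem.Int.bitLength (PySem.Int.band (p - 1) (-(p - 1))) - 1 = t := by
      rw [hband, bitLength_two_pow, Nat.add_sub_cancel]
    have hshift : (p - 1) >>> t = r := by
      rw [Int.shiftRight_eq_div_pow, hm]
      have : ((2 ^ t : Nat) : Int) = (2 : Int) ^ t := by push_cast; ring
      rw [this, Int.mul_ediv_cancel_left _ (by positivity)]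
    have hl : ∀ u ∈ PySem.List.pyRange 1 (PySem.Int.floordiv bits 2) 1, 1 ≤ u := by
      intro u hu
      exact (PySem.List.mem_pyRange_one.mp hu).1
    simp only [ur_decompose, ur_decompose_alt, if_neg h0, hbl, hshift, urLoopA_eq_list,
      urLoopAList_eq (p - 1) t r hr hm _ hl]
    by_cases hc : 1 ≤ t ∧ (t : Int) < PySem.Int.floordiv bits 2
    · rw [if_pos (PySem.List.mem_pyRange_one.mpr ⟨by exact_mod_cast hc.1, hc.2⟩), if_pos hc]
    · rw [if_neg (fun hmem => hc ⟨by exact_mod_cast (PySem.List.mem_pyRange_one.mp hmem).1,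
        (PySem.List.mem_pyRange_one.mp hmem).2⟩), if_neg hc]
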